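-- pv_equiv track=rewrite | github.com/MaschinenNah/oc2023 | 04zahlentheorie/hochzusammengesetzte.py | hochzusammengesetzte_zahlen
-- ===== SOURCE A (Python) =====
-- def alle_teiler(zahl):
--     resultat = []
--     max_teiler = zahl // 2 + 1
--     for teiler in range(1, max_teiler):
--         if (zahl % teiler == 0):
--             resultat.append(teiler)
--     #resultat.append(zahl)
--     return resultat
--
-- def hochzusammengesetzte_zahlen(max_zahl):
--     resultat = []
--     anzahl_teiler = 0
--     for zahl in range(1, max_zahl):
--         anzahl_teiler_neu = len(alle_teiler(zahl))
--         if anzahl_teiler_neu > anzahl_teiler: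
--             resultat.append(zahl)
--             anzahl_teiler = anzahl_teiler_neu
--     return resultat
-- ===== SOURCE B (Python) =====
-- def hochzusammengesetzte_zahlen(max_zahl):
--     # Divisor-count sieve: every d marks its proper multiples, then one record scan.
--     counts = {}
--     for d in range(1, max_zahl):
--         for m in range(2 * d, max_zahl, d):
--             counts[m] = counts.get(m, 0) + 1
--     resultat = []
--     rekord = 0
--     for zahl in range(1, max_zahl):
--         c = counts.get(zahl, 0)
--         if c > rekord:
--             resultat.append(zahl)
--             rekord = c
--     return resultat
-- ===== Notes on version B (the rewrite author's own statement) =====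
-- stated objective: faster
-- what changed: Replaces per-number trial division over every candidate divisor (nested O(n^2) scans) with a single divisor-count sieve (each d marks its proper multiples in a dict) followed by one record scan.
import Mathlib
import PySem

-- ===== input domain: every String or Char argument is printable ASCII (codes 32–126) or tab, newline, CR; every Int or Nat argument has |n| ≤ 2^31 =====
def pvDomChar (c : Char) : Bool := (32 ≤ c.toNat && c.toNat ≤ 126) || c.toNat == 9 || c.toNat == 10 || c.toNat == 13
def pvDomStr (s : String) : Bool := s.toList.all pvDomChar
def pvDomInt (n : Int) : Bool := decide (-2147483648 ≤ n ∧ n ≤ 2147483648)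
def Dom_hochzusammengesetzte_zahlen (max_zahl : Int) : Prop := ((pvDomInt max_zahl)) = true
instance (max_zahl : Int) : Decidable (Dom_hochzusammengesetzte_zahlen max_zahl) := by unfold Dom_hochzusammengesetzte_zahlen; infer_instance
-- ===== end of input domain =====

-- B replaces per-number trial division with one divisor-count sieve plus a record scan (asymptotically faster).


-- ===== PORT A =====
def alle_teiler (zahl : Int) : List Int :=
  (PySem.List.pyRange 1 (PySem.Int.floordiv zahl 2 + 1) 1).foldl
    (fun resultat teiler =>
      if PySem.Int.mod zahl teiler == 0 then resultat ++ [teiler] else resultat) []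

def hochzusammengesetzte_zahlen (max_zahl : Int) : List Int :=
  ((PySem.List.pyRange 1 max_zahl 1).foldl
    (fun st zahl =>
      let anzahl_teiler_neu : Int := ((alle_teiler zahl).length : Int)
      if anzahl_teiler_neu > st.2 then (st.1 ++ [zahl], anzahl_teiler_neu) else st)
    (([] : List Int), (0 : Int))).1

-- ===== PORT B =====
def hochzusammengesetzte_zahlen_alt (max_zahl : Int) : List Int :=
  let counts : PySem.Dict Int Int :=
    (PySem.List.pyRange 1 max_zahl 1).foldl
      (fun cnt d =>
        (PySem.List.pyRange (2 * d) max_zahl d).foldl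
          (fun cnt m => cnt.modify m 0 (· + 1)) cnt)
      PySem.Dict.empty
  ((PySem.List.pyRange 1 max_zahl 1).foldl
    (fun st zahl =>
      let c : Int := counts.getD zahl 0
      if c > st.2 then (st.1 ++ [zahl], c) else st)
    (([] : List Int), (0 : Int))).1

-- ===== PRECONDITION & SPEC =====
def Spec_hochzusammengesetzte_zahlen (max_zahl : Int) (out : List Int) : Prop := out = hochzusammengesetzte_zahlen_alt max_zahl
instance (max_zahl : Int) (out : List Int) : Decidable (Spec_hochzusammengesetzte_zahlen max_zahl out) := by unfold Spec_hochzusammengesetzte_zahlen; infer_instance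

-- ===== CLAIM (what is proved, stated in full; the proofs are below) =====
def Claim_equal_hochzusammengesetzte_zahlen : Prop := ∀ (max_zahl : Int), Dom_hochzusammengesetzte_zahlen max_zahl → Spec_hochzusammengesetzte_zahlen max_zahl (hochzusammengesetzte_zahlen max_zahl)

-- ===== LEMMAS AND PROOFS =====

-- a positive-step pyRange has no duplicates
lemma nodup_pyRange_pos (a b : Int) {s : Int} (hs : 0 < s) :
    (PySem.List.pyRange a b s).Nodup := by
  rw [PySem.List.pyRange_of_pos a b hs]
  refine List.Nodup.map ?_ List.nodup_range
  intro k1 k2 h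
  have h2 : s * (k1 : Int) = s * (k2 : Int) := by linarith
  have h3 := mul_left_cancel₀ (by omega : s ≠ 0) h2
  exact_mod_cast h3

-- count of one value in a positive-step range is its membership indicator
lemma count_pyRange_pos (a b z : Int) {s : Int} (hs : 0 < s) :
    (List.count z (PySem.List.pyRange a b s) : Int)
      = if z ∈ PySem.List.pyRange a b s then 1 else 0 := by
  by_cases h : z ∈ PySem.List.pyRange a b s
  · rw [List.count_eq_one_of_mem (nodup_pyRange_pos a b hs) h, if_pos h]; norm_num
  · rw [List.count_eq_zero_of_not_mem h, if_neg h]; norm_num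

-- the sieve's table value at z is the summed multiple-counts over all processed d
lemma sieve_getD (n : Int) (L : List Int) (cnt : PySem.Dict Int Int) (z : Int) :
    ((L.foldl
      (fun cnt d =>
        (PySem.List.pyRange (2 * d) n d).foldl
          (fun cnt m => cnt.modify m 0 (· + 1)) cnt) cnt).getD z 0)
      = cnt.getD z 0
        + (L.map (fun d => (List.count z (PySem.List.pyRange (2 * d) n d) : Int))).sum := by
  induction L generalizing cnt with
  | nil => simp
  | cons d L ih =>
    simp only [List.foldl_cons, List.map_cons, List.sum_cons]
    rw [ih, PySem.Dict.getD_foldl_modify_add_one]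
    ring

-- the key counting identity: the number of d ≥ 1 whose multiple-range hits z
-- equals A's proper-divisor count of z, for 1 ≤ z < n
lemma count_eq_teiler (n z : Int) (hz1 : 1 ≤ z) (hzn : z < n) :
    ((PySem.List.pyRange 1 n 1).map
        (fun d => (List.count z (PySem.List.pyRange (2 * d) n d) : Int))).sum
      = ((alle_teiler z).length : Int) := by
  -- each summand is a membership indicator
  have h1 : ((PySem.List.pyRange 1 n 1).map
        (fun d => (List.count z (PySem.List.pyRange (2 * d) n d) : Int))).sum
      = ((PySem.List.pyRange 1 n 1).map
        (fun d => if decide (z ∈ PySem.List.pyRange (2 * d) n d) = true then (1 : Int) else 0)).sum := by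
    refine congrArg List.sum (List.map_congr_left ?_)
    intro d hd
    have hd1 : 1 ≤ d := ((PySem.List.mem_pyRange_one).1 hd).1
    rw [count_pyRange_pos _ _ _ (by omega : (0:Int) < d)]
    simp
  rw [h1, PySem.List.sum_map_ite_one_zero]
  -- A's count is a countP over range(1, z//2 + 1)
  have h2 : ((alle_teiler z).length : Int)
      = ((PySem.List.pyRange 1 (z / 2 + 1) 1).countP
          (fun t => PySem.Int.mod z t == 0) : Int) := by
    unfold alle_teiler
    rw [PySem.Int.floordiv_eq_ediv_of_pos (by omega : (0:Int) < 2)]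
    rw [PySem.List.foldl_append_if_eq_filter]
    simp [List.countP_eq_length_filter]
  rw [h2]
  congr 1
  -- split the d-range at z/2 + 1; past it the indicator is 0
  rw [PySem.List.pyRange_one_append 1 (z / 2 + 1) n (by omega) (by omega), List.countP_append]
  have h3 : (PySem.List.pyRange (z / 2 + 1) n 1).countP
      (fun d => decide (z ∈ PySem.List.pyRange (2 * d) n d)) = 0 := by
    rw [List.countP_eq_zero]
    intro d hd
    have hd1 := (PySem.List.mem_pyRange_one).1 hd
    simp only [decide_eq_true_eq]
    intro hmem
    have := (PySem.List.mem_pyRange_iff_of_pos (by omega : (0:Int) < d) z).1 hmem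
    omega
  rw [h3, Nat.add_zero]
  -- below z/2 + 1 the indicator is the divisibility test
  refine List.countP_congr ?_
  intro t ht
  have ht1 := (PySem.List.mem_pyRange_one).1 ht
  simp only [decide_eq_true_eq, beq_iff_eq]
  rw [PySem.List.mem_pyRange_iff_of_pos (by omega : (0:Int) < t), PySem.Int.mod_eq_zero_iff_dvd]
  constructor
  · rintro ⟨hle, _, hdvd⟩
    have h := dvd_add hdvd (dvd_mul_left t 2)
    simpa using h
  · intro hdvd
    refine ⟨?_, hzn, ?_⟩
    · -- t ≤ z/2 ⇒ 2t ≤ z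
      omega
    · exact dvd_sub hdvd (dvd_mul_left t 2)

theorem hochzusammengesetzte_zahlen_spec' (n : Int) :
    hochzusammengesetzte_zahlen n = hochzusammengesetzte_zahlen_alt n := by
  unfold hochzusammengesetzte_zahlen hochzusammengesetzte_zahlen_alt
  simp only []
  congr 1
  apply PySem.List.foldl_congr_mem
  intro acc z hz
  have hmem := (PySem.List.mem_pyRange_one (a := 1) (b := n) (x := z)).1 hz
  have : ((PySem.List.pyRange 1 n 1).foldl
      (fun cnt d =>
        (PySem.List.pyRange (2 * d) n d).foldl
          (fun cnt m => cnt.modify m 0 (· + 1)) cnt) PySem.Dict.empty).getD z 0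
      = ((alle_teiler z).length : Int) := by
    rw [sieve_getD]
    simpa using count_eq_teiler n z hmem.1 hmem.2
  simp only [this]

-- ===== VERDICT (by name: the statement is the Claim_ definition above) =====
theorem hochzusammengesetzte_zahlen_spec : Claim_equal_hochzusammengesetzte_zahlen := by
  intro n _
  exact hochzusammengesetzte_zahlen_spec' n
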